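-- pv_equiv track=rewrite | github.com/reejr-ray/ComputerNetworks | labs/lab0/lab0.py | merge_odds
-- ===== SOURCE A (Python) =====
-- def merge_odds(l1, l2):
--     odds = {}
--     # populate the dictionary's indicies with the longest list --
--     count = 0 # reset the counter
--     for i in l1: # put all relavent items from l1 into odds
--     	if (i % 2) != 0:
--     		if odds.get(count)==None:
-- 	    		odds[count] = list()
-- 	    		odds[count].append(i)
-- 	    	else:
-- 	    		odds[count].append(i)
-- 	    	count += 1
--
--     count = 0 # reset the counter
--     for i in l2: # put all relavent items from l1 into odds
--     	if (i % 2) != 0: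
--     		if odds.get(count)==None:
-- 	    		odds[count] = list()
-- 	    		odds[count].append(i)
-- 	    	else:
-- 	    		odds[count].append(i)
-- 	    	count += 1
--     return odds
-- ===== SOURCE B (Python) =====
-- def merge_odds(l1, l2):
--     # Zip-with-padding: filter the odds, then build the whole dict at once from
--     # a range comprehension using one-element slices (no per-element dict mutation).
--     odds1 = [x for x in l1 if x % 2 != 0]
--     odds2 = [x for x in l2 if x % 2 != 0]
--     return {k: odds1[k:k + 1] + odds2[k:k + 1]
--             for k in range(max(len(odds1), len(odds2)))}
-- ===== Notes on version B (the rewrite author's own statement) =====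
-- stated objective: alternative
-- what changed: B replaces A's two counter-driven get/insert/append mutation loops over the dict by a zip-with-padding construction: filter the odds of each list, then build the whole dict in one range comprehension whose value at key k is odds1[k:k+1] + odds2[k:k+1] (no per-element dict lookups or mutation).
import Mathlib
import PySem

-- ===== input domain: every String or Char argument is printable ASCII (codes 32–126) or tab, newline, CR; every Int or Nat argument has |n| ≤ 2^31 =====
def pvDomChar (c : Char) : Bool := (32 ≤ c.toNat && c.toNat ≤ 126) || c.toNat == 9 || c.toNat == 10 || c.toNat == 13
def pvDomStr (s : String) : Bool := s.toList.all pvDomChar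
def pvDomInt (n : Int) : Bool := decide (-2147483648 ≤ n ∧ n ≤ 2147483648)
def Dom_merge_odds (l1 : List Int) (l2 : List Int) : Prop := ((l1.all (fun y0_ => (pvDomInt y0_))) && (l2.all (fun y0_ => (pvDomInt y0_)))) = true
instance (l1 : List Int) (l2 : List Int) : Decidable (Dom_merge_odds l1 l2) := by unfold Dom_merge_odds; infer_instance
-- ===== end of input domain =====

-- B filters the odds, then builds the dict at once from a range comprehension with
-- one-element slices (zip-with-padding) instead of A's per-element get/insert/append
-- mutation loops; objective: alternative algorithm, same cost.

-- ===== PORT A =====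
-- one iteration of A's (identical) loop body: conditional insert/append plus counter bump
def mergeOddsStep (st : PySem.Dict Int (List Int) × Int) (i : Int) :
    PySem.Dict Int (List Int) × Int :=
  if PySem.Int.mod i 2 != 0 then
    let d := st.1
    let count := st.2
    let d' := if d.get? count = none then
        (d.insert count []).modify count [] (fun v => v ++ [i])
      else
        d.modify count [] (fun v => v ++ [i])
    (d', count + 1)
  else st

def merge_odds (l1 : List Int) (l2 : List Int) : List (Int × List Int) :=
  let st1 := l1.foldl mergeOddsStep (PySem.Dict.empty, 0)
  let st2 := l2.foldl mergeOddsStep (st1.1, 0)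
  st2.1.items

-- ===== PORT B =====
def merge_odds_alt (l1 : List Int) (l2 : List Int) : List (Int × List Int) :=
  let odds1 := l1.filter (fun x => PySem.Int.mod x 2 != 0)
  let odds2 := l2.filter (fun x => PySem.Int.mod x 2 != 0)
  -- dict comprehension over range(max(len(odds1), len(odds2)))
  let d := (PySem.List.pyRange 0 (max (odds1.length : Int) (odds2.length : Int)) 1).foldl
    (fun d k => d.insert k
      (PySem.List.slice odds1 (some k) (some (k + 1)) ++
       PySem.List.slice odds2 (some k) (some (k + 1)))) PySem.Dict.empty
  d.items

-- ===== PRECONDITION & SPEC =====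
def Spec_merge_odds (l1 : List Int) (l2 : List Int) (out : List (Int × List Int)) : Prop := out = merge_odds_alt l1 l2
instance (l1 : List Int) (l2 : List Int) (out : List (Int × List Int)) : Decidable (Spec_merge_odds l1 l2 out) := by unfold Spec_merge_odds; infer_instance

-- ===== CLAIM (what is proved, stated in full; the proofs are below) =====
def Claim_equal_merge_odds : Prop := ∀ (l1 : List Int) (l2 : List Int), Dom_merge_odds l1 l2 → Spec_merge_odds l1 l2 (merge_odds l1 l2)

-- ===== LEMMAS AND PROOFS =====

-- the unconditional body of A's loop (what mergeOddsStep does on an odd element)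
def oddStep (st : PySem.Dict Int (List Int) × Int) (i : Int) :
    PySem.Dict Int (List Int) × Int :=
  (if st.1.get? st.2 = none then
      (st.1.insert st.2 []).modify st.2 [] (fun v => v ++ [i])
    else
      st.1.modify st.2 [] (fun v => v ++ [i]),
   st.2 + 1)

-- zip-with-padding on the value lists: what both programs compute, index by index
def mergeVals : List (List Int) → List Int → List (List Int)
  | q, [] => q
  | [], x :: bs => [x] :: mergeVals [] bs
  | v :: q, x :: bs => (v ++ [x]) :: mergeVals q bs

lemma mergeVals_nil (b : List Int) : mergeVals [] b = b.map (fun x => [x]) := by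
  induction b with
  | nil => rfl
  | cons x bs ih => simpa [mergeVals] using ih

lemma foldl_mergeOddsStep_filter (l : List Int) (st : PySem.Dict Int (List Int) × Int) :
    l.foldl mergeOddsStep st
      = (l.filter (fun x => PySem.Int.mod x 2 != 0)).foldl oddStep st := by
  induction l generalizing st with
  | nil => rfl
  | cons x xs ih =>
    rw [List.foldl_cons, List.filter_cons]
    by_cases h : (PySem.Int.mod x 2 != 0) = true
    · rw [if_pos h, List.foldl_cons, ih]
      congr 1
      show mergeOddsStep st x = oddStep st x
      unfold mergeOddsStep oddStep
      rw [if_pos h]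
    · rw [if_neg h, ih]
      congr 1
      show mergeOddsStep st x = st
      unfold mergeOddsStep
      rw [if_neg h]

lemma keep_map (p : List (Int × List Int)) (c : Int) (w : List Int)
    (h : ∀ kv ∈ p, kv.1 ≠ c) :
    p.map (fun kv => if kv.1 = c then (c, w) else kv) = p := by
  have := List.map_congr_left
    (f := fun kv : Int × List Int => if kv.1 = c then (c, w) else kv)
    (g := id) (l := p) (fun kv hkv => by simp [h kv hkv])
  simpa using this

lemma enum_key_ne (q : List (List Int)) (c : Int) :
    ∀ kv ∈ PySem.List.enumerate q (c + 1), kv.1 ≠ c := by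
  intro kv hkv
  rcases (PySem.List.mem_enumerate_iff q (c + 1) kv).mp hkv with ⟨k, hk, rfl⟩
  simp
  omega

-- A's fold turns ⟨finished prefix p (keys < c) ++ remaining values q enumerated from c⟩
-- into the same with q zip-padded with the incoming elements
lemma foldl_oddStep_mergeVals (b : List Int) :
    ∀ (q : List (List Int)) (p : List (Int × List Int)) (c : Int),
    (∀ kv ∈ p, kv.1 < c) →
    (b.foldl oddStep (⟨p ++ PySem.List.enumerate q c⟩, c)).1
      = ⟨p ++ PySem.List.enumerate (mergeVals q b) c⟩ := by
  induction b with
  | nil => intro q p c _; simp [mergeVals]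
  | cons x bs ih =>
    intro q p c hp
    have hne : ∀ kv ∈ p, kv.1 ≠ c := fun kv hkv => (hp kv hkv).ne
    have hany : (p.any fun kv => kv.1 == c) = false := by
      rw [List.any_eq_false]; intro kv hkv; simp [hne kv hkv]
    have hfind : List.find? (fun kv => kv.1 == c) p = none := by
      rw [List.find?_eq_none]; intro kv hkv; simp [hne kv hkv]
    rw [List.foldl_cons]
    cases q with
    | nil =>
      have hstep : oddStep (⟨p ++ PySem.List.enumerate [] c⟩, c) x
          = (⟨(p ++ [(c, [x])]) ++ PySem.List.enumerate [] (c + 1)⟩, c + 1) := by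
        simp only [PySem.List.enumerate_nil, List.append_nil]
        have hget : (PySem.Dict.mk (κ := Int) (ν := List Int) p).get? c = none := by
          simp [PySem.Dict.get?, hfind]
        unfold oddStep
        rw [if_pos hget]
        have e1 : (PySem.Dict.mk (κ := Int) (ν := List Int) p).insert c [] = ⟨p ++ [(c, [])]⟩ := by
          simp [PySem.Dict.insert, PySem.Dict.contains, hany]
        rw [e1]
        unfold PySem.Dict.modify
        have e2 : (PySem.Dict.mk (κ := Int) (ν := List Int) (p ++ [(c, [])])).getD c [] = [] := by
          simp [PySem.Dict.getD, PySem.Dict.get?, List.find?_append, hfind]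
        rw [e2]
        have e3 : (PySem.Dict.mk (κ := Int) (ν := List Int) (p ++ [(c, [])])).insert c ([] ++ [x])
            = ⟨p ++ [(c, [x])]⟩ := by
          simp only [PySem.Dict.insert, PySem.Dict.contains, List.any_append, hany,
            List.any_cons, List.any_nil, beq_self_eq_true, Bool.false_or, Bool.or_false,
            if_true, List.map_append, List.map_cons, List.map_nil,
            beq_iff_eq]
          rw [keep_map p c _ hne]
          simp
        rw [e3]
      rw [hstep, ih [] (p ++ [(c, [x])]) (c + 1)
        (by intro kv hkv
            rcases List.mem_append.mp hkv with h | h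
            · exact lt_trans (hp kv h) (by omega)
            · simp only [List.mem_singleton] at h; subst h; exact lt_add_one c)]
      have hm : mergeVals [] (x :: bs) = [x] :: mergeVals [] bs := rfl
      rw [hm, PySem.List.enumerate_cons]
      simp
    | cons v q' =>
      have hneE : ∀ kv ∈ PySem.List.enumerate q' (c + 1), kv.1 ≠ c := enum_key_ne q' c
      have hstep : oddStep (⟨p ++ PySem.List.enumerate (v :: q') c⟩, c) x
          = (⟨(p ++ [(c, v ++ [x])]) ++ PySem.List.enumerate q' (c + 1)⟩, c + 1) := by
        rw [PySem.List.enumerate_cons]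
        have hget : (PySem.Dict.mk (κ := Int) (ν := List Int)
            (p ++ (c, v) :: PySem.List.enumerate q' (c + 1))).get? c = some v := by
          simp [PySem.Dict.get?, List.find?_append, hfind]
        unfold oddStep
        rw [if_neg (by simp [hget])]
        unfold PySem.Dict.modify
        have e2 : (PySem.Dict.mk (κ := Int) (ν := List Int)
            (p ++ (c, v) :: PySem.List.enumerate q' (c + 1))).getD c [] = v := by
          simp [PySem.Dict.getD, hget]
        rw [e2]
        have e3 : (PySem.Dict.mk (κ := Int) (ν := List Int)
              (p ++ (c, v) :: PySem.List.enumerate q' (c + 1))).insert c (v ++ [x])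
            = ⟨(p ++ [(c, v ++ [x])]) ++ PySem.List.enumerate q' (c + 1)⟩ := by
          have hcont : (PySem.Dict.mk (κ := Int) (ν := List Int)
              (p ++ (c, v) :: PySem.List.enumerate q' (c + 1))).contains c = true := by
            simp [PySem.Dict.contains, List.any_append]
          simp only [PySem.Dict.insert, hcont, if_true, List.map_append, List.map_cons,
            beq_iff_eq]
          rw [keep_map p c _ hne, keep_map _ c _ hneE]
          simp
        rw [e3]
      rw [hstep, ih q' (p ++ [(c, v ++ [x])]) (c + 1)
        (by intro kv hkv
            rcases List.mem_append.mp hkv with h | h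
            · exact lt_trans (hp kv h) (by omega)
            · simp only [List.mem_singleton] at h; subst h; exact lt_add_one c)]
      have hm : mergeVals (v :: q') (x :: bs) = (v ++ [x]) :: mergeVals q' bs := rfl
      rw [hm, PySem.List.enumerate_cons]
      simp

lemma mergeVals_getElem? (q : List (List Int)) (b : List Int) (i : Nat) :
    (mergeVals q b)[i]? = match q[i]?, b[i]? with
      | some v, some x => some (v ++ [x])
      | some v, none => some v
      | none, some x => some [x]
      | none, none => none := by
  induction q generalizing b i with
  | nil =>
    rw [mergeVals_nil]
    cases h : b[i]? <;> simp [List.getElem?_map, h]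
  | cons v q' ih =>
    cases b with
    | nil =>
      have : mergeVals (v :: q') [] = v :: q' := rfl
      rw [this]
      cases h : (v :: q')[i]? <;> simp
    | cons x bs =>
      have : mergeVals (v :: q') (x :: bs) = (v ++ [x]) :: mergeVals q' bs := rfl
      rw [this]
      cases i with
      | zero => simp
      | succ j => simpa using ih bs j

lemma take_one_drop (xs : List Int) (i : Nat) : (xs.drop i).take 1 = xs[i]?.toList := by
  cases h : xs[i]? with
  | none =>
    have hlen : xs.length ≤ i := by simpa [List.getElem?_eq_none_iff] using h
    simp [List.drop_eq_nil_of_le hlen]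
  | some x =>
    rcases List.getElem?_eq_some_iff.mp h with ⟨hi, hx⟩
    rw [← List.getElem_cons_drop (as := xs) hi]
    simp [hx]

-- the range-with-slices comprehension of B is exactly the enumerated zip-with-padding
lemma range_slice_eq_enum_mergeVals (o1 o2 : List Int) :
    (PySem.List.pyRange 0 (max (o1.length : Int) (o2.length : Int)) 1).map
        (fun k => (k, PySem.List.slice o1 (some k) (some (k + 1)) ++
                      PySem.List.slice o2 (some k) (some (k + 1))))
      = PySem.List.enumerate (mergeVals (o1.map (fun x => [x])) o2) 0 := by
  have hN : max (o1.length : Int) (o2.length : Int) = ((max o1.length o2.length : Nat) : Int) := by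
    simp [Nat.cast_max]
  rw [hN, PySem.List.pyRange_one]
  apply List.ext_getElem?
  intro i
  rw [List.getElem?_map, List.getElem?_map, PySem.List.getElem?_enumerate,
    mergeVals_getElem?, List.getElem?_map]
  have hsl : ∀ (xs : List Int) (j : Nat),
      PySem.List.slice xs (some (j : Int)) (some ((j : Int) + 1)) = xs[j]?.toList := by
    intro xs j
    have h1 : ((j : Int) + 1) = ((j : Int) + ((1 : Nat) : Int)) := by simp
    rw [h1, PySem.List.slice_natCast_add, take_one_drop]
  cases h1 : o1[i]? with
  | none =>
    cases h2 : o2[i]? with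
    | none =>
      have hge : max o1.length o2.length ≤ i := by
        have := List.getElem?_eq_none_iff.mp h1
        have := List.getElem?_eq_none_iff.mp h2
        omega
      rw [List.getElem?_eq_none_iff.mpr (by simpa using hge)]
      simp
    | some x =>
      have hlt : i < max o1.length o2.length := by
        have : i < o2.length := (List.getElem?_eq_some_iff.mp h2).1
        omega
      rw [List.getElem?_eq_getElem (by simpa using hlt)]
      simp [hsl, h1, h2]
  | some v =>
    have hlt : i < max o1.length o2.length := by
      have : i < o1.length := (List.getElem?_eq_some_iff.mp h1).1
      omega
    rw [List.getElem?_eq_getElem (by simpa using hlt)]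
    cases h2 : o2[i]? <;> simp [hsl, h1, h2]

lemma pyRange_map_nodup (N : Int) :
    ((PySem.List.pyRange 0 N 1).map (fun a : Int => a)).Nodup := by
  rw [PySem.List.pyRange_one]
  simp only [List.map_map]
  exact List.Nodup.map (fun a b h => by simpa using h) List.nodup_range

-- ===== VERDICT (by name: the statement is the Claim_ definition above) =====
theorem merge_odds_spec : Claim_equal_merge_odds := by
  intro l1 l2 _
  show merge_odds l1 l2 = merge_odds_alt l1 l2
  show (List.foldl mergeOddsStep ((List.foldl mergeOddsStep (PySem.Dict.empty, 0) l1).1, 0) l2).1.items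
      = (List.foldl (fun d k => d.insert k
            (PySem.List.slice (l1.filter (fun x => PySem.Int.mod x 2 != 0)) (some k) (some (k + 1)) ++
             PySem.List.slice (l2.filter (fun x => PySem.Int.mod x 2 != 0)) (some k) (some (k + 1))))
          PySem.Dict.empty
          (PySem.List.pyRange 0
            (max ((l1.filter (fun x => PySem.Int.mod x 2 != 0)).length : Int)
                 ((l2.filter (fun x => PySem.Int.mod x 2 != 0)).length : Int)) 1)).items
  rw [foldl_mergeOddsStep_filter, foldl_mergeOddsStep_filter]
  set a := l1.filter (fun x => PySem.Int.mod x 2 != 0) with ha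
  set b := l2.filter (fun x => PySem.Int.mod x 2 != 0) with hb
  have h1 : (a.foldl oddStep (PySem.Dict.empty, 0)).1
      = ⟨PySem.List.enumerate (mergeVals [] a) 0⟩ := by
    have := foldl_oddStep_mergeVals a [] [] 0 (by simp)
    simpa [PySem.Dict.empty] using this
  rw [h1]
  have h2 : (b.foldl oddStep ((⟨PySem.List.enumerate (mergeVals [] a) 0⟩ :
        PySem.Dict Int (List Int)), 0)).1
      = ⟨PySem.List.enumerate (mergeVals (a.map (fun x => [x])) b) 0⟩ := by
    have := foldl_oddStep_mergeVals b (mergeVals [] a) [] 0 (by simp)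
    simpa [mergeVals_nil] using this
  rw [h2]
  -- B's side: fresh distinct keys, so the fold's items are the comprehension list
  have hB := PySem.Dict.items_foldl_insert_fresh
    (l := PySem.List.pyRange 0 (max (a.length : Int) (b.length : Int)) 1)
    (k := fun a : Int => a)
    (v := fun k => (PySem.List.slice a (some k) (some (k + 1)) ++
                    PySem.List.slice b (some k) (some (k + 1))))
    (d := PySem.Dict.empty)
    (by intro x _; simp [PySem.Dict.contains_empty])
    (pyRange_map_nodup _)
  rw [hB]
  simpa using (range_slice_eq_enum_mergeVals a b).symm
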